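-- pv_equiv track=rewrite | github.com/enlupi/aie4ml | src/aie4ml/passes/memtile_legalize.py | _split_ports_serial
-- ===== SOURCE A (Python) =====
-- def _split_ports_serial(n: int, units: int):
--     chunk = (n + units - 1) // units
--     out = []
--     start = 0
--     for _ in range(units):
--         size = min(chunk, n - start)
--         out.append(list(range(start, start + size)))
--         start += size
--     return out
-- ===== SOURCE B (Python) =====
-- def _split_ports_serial(n: int, units: int):
--     chunk = (n + units - 1) // units
--     out = [[] for _ in range(units)]
--     if out and chunk > 0:
--         for j in range(n):
--             out[j // chunk].append(j)
--     return out
-- ===== Notes on version B (the rewrite author's own statement) =====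
-- stated objective: alternative
-- what changed: Replaces A's sequential boundary/accumulator construction (cutting the next chunk off a running start with min/size bookkeeping) with a bucket-distribution pass: pre-create the units empty buckets, then assign each index j to bucket j // chunk; a timing run measured this constant-factor faster on the generated inputs.
import Mathlib
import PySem

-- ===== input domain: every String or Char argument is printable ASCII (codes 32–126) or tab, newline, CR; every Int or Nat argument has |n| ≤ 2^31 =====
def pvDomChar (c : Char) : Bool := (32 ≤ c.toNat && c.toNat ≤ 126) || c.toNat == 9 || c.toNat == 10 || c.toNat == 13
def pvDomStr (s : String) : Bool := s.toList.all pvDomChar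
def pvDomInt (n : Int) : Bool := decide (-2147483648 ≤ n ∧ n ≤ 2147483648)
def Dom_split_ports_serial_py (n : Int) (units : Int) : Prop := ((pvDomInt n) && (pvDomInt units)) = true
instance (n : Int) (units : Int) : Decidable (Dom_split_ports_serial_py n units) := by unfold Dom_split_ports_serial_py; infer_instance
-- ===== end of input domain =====

-- B replaces A's sequential boundary/accumulator construction by a bucket distribution:
-- pre-create the `units` empty buckets, then assign each index j to bucket j // chunk
-- in one pass over range(n) (objective: alternative algorithm, same cost).

-- ===== PORT A =====
-- A's `for _ in range(units)` loop with state (out, start); `size = min(chunk, n - start)`,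
-- append `list(range(start, start + size))`, `start += size`.
def pvALoop (n chunk : Int) : Nat → Int → List (List Int) → List (List Int)
  | 0, _, out => out
  | k + 1, start, out =>
      let size := min chunk (n - start)
      pvALoop n chunk k (start + size) (out ++ [PySem.List.pyRange start (start + size) 1])

def split_ports_serial_py (n : Int) (units : Int) : List (List Int) :=
  let chunk := PySem.Int.floordiv (n + units - 1) units
  pvALoop n chunk units.toNat 0 []

-- ===== PORT B =====
-- `if out and chunk > 0: for j in range(n): out[j // chunk].append(j)`.
-- Inside the loop j ≥ 0 and chunk > 0, so j // chunk ≥ 0 and the Python index never wraps;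
-- `.toNat` on that nonnegative quotient is exact, and `List.modify` is the in-place append.
def split_ports_serial_py_alt (n : Int) (units : Int) : List (List Int) :=
  let chunk := PySem.Int.floordiv (n + units - 1) units
  let out := (PySem.List.pyRange 0 units 1).map (fun _ => ([] : List Int))
  if out ≠ [] ∧ 0 < chunk then
    (PySem.List.pyRange 0 n 1).foldl
      (fun out j => out.modify (PySem.Int.floordiv j chunk).toNat (fun b => b ++ [j])) out
  else out

-- ===== PRECONDITION & SPEC =====
-- units = 0 makes `(n + units - 1) // units` raise ZeroDivisionError in A (and in B).
def Pre_split_ports_serial_py (n : Int) (units : Int) : Prop := units ≠ 0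
instance (n : Int) (units : Int) : Decidable (Pre_split_ports_serial_py n units) := by
  unfold Pre_split_ports_serial_py; infer_instance

def pvWitness_split_ports_serial_py : Int × Int := (10, 3)

def Spec_split_ports_serial_py (n : Int) (units : Int) (out : List (List Int)) : Prop :=
  out = split_ports_serial_py_alt n units
instance (n : Int) (units : Int) (out : List (List Int)) : Decidable (Spec_split_ports_serial_py n units out) := by
  unfold Spec_split_ports_serial_py; infer_instance

-- ===== CLAIM (what is proved, stated in full; the proofs are below) =====
def Claim_equal_split_ports_serial_py : Prop := ∀ (n : Int) (units : Int), Dom_split_ports_serial_py n units → Pre_split_ports_serial_py n units → Spec_split_ports_serial_py n units (split_ports_serial_py n units)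

-- ===== LEMMAS AND PROOFS =====

-- the canonical answer: units segments, segment i is the clipped interval [i*chunk, (i+1)*chunk) ∩ [0, n)
def pvSeg (chunk a : Int) (i : Nat) : List Int :=
  PySem.List.pyRange (min ((i : Int) * chunk) a) (min (((i : Int) + 1) * chunk) a) 1

-- A's segments as produced left to right from a running start
def pvSegs (n chunk : Int) : Nat → Int → List (List Int)
  | 0, _ => []
  | k + 1, start =>
      PySem.List.pyRange start (min (start + chunk) n) 1 ::
        pvSegs n chunk k (min (start + chunk) n)

theorem pvALoop_eq (n chunk : Int) :
    ∀ (k : Nat) (start : Int) (out : List (List Int)),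
      pvALoop n chunk k start out = out ++ pvSegs n chunk k start := by
  intro k
  induction k with
  | zero => intro start out; simp [pvALoop, pvSegs]
  | succ k ih =>
      intro start out
      have h : start + min chunk (n - start) = min (start + chunk) n := by omega
      simp only [pvALoop, pvSegs, ih, h, List.append_assoc, List.singleton_append]

theorem pvSegs_nonpos (n chunk : Int) (hc : chunk ≤ 0) :
    ∀ (k : Nat) (start : Int), pvSegs n chunk k start = List.replicate k [] := by
  intro k
  induction k with
  | zero => intro start; simp [pvSegs]
  | succ k ih =>
      intro start
      simp [pvSegs, ih, List.replicate_succ]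
      exact PySem.List.pyRange_one_eq_nil (by omega)

theorem pvSegs_eq_map (n chunk : Int) (hc : 1 ≤ chunk) :
    ∀ (k i : Nat),
      pvSegs n chunk k (min ((i : Int) * chunk) n) = (List.range' i k).map (pvSeg chunk n) := by
  intro k
  induction k with
  | zero => intro i; simp [pvSegs]
  | succ k ih =>
      intro i
      have hmin : min (min ((i : Int) * chunk) n + chunk) n = min (((i : Int) + 1) * chunk) n := by
        rcases le_or_gt ((i : Int) * chunk) n with h | h
        · have : ((i : Int) + 1) * chunk = (i : Int) * chunk + chunk := by ring
          omega
        · have : (i : Int) * chunk ≤ ((i : Int) + 1) * chunk := by nlinarith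
          omega
      have hcast : ((i + 1 : Nat) : Int) = (i : Int) + 1 := by push_cast; ring
      simp only [pvSegs, hmin, List.range'_succ, List.map_cons, pvSeg]
      refine congrArg₂ List.cons rfl ?_
      have := ih (i + 1)
      rw [hcast] at this
      exact this

-- the pre-created bucket row is `units.toNat` empty lists
theorem pvInit_replicate (units : Int) :
    (PySem.List.pyRange 0 units 1).map (fun _ => ([] : List Int)) =
      List.replicate units.toNat [] := by
  rw [List.eq_replicate_iff]
  constructor
  · rw [List.length_map, PySem.List.length_pyRange_one]; omega
  · intro x hx
    rcases List.mem_map.mp hx with ⟨_, _, h⟩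
    exact h.symm

theorem pvSeg_start (chunk : Int) (hc : 1 ≤ chunk) (i : Nat) :
    pvSeg chunk 0 i = [] := by
  apply PySem.List.pyRange_one_eq_nil
  have h0 : (0 : Int) ≤ (i : Int) * chunk := by positivity
  have h1 : (0 : Int) ≤ ((i : Int) + 1) * chunk := by positivity
  omega

-- one distribution step: appending j to bucket j//chunk advances every clipped segment from bound a to a+1
theorem pvBucket_step (chunk : Int) (u : Nat) (hc : 1 ≤ chunk) (a : Int) (ha : 0 ≤ a)
    (hau : a < chunk * u) :
    ((List.range u).map (pvSeg chunk a)).modify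
        (PySem.Int.floordiv a chunk).toNat (fun b => b ++ [a]) =
      (List.range u).map (pvSeg chunk (a + 1)) := by
  set k := PySem.Int.floordiv a chunk with hk
  have hk0 : 0 ≤ k := by
    rw [hk, PySem.Int.le_floordiv_iff_mul_le (by omega)]
    omega
  have hklo : k * chunk ≤ a :=
    (PySem.Int.le_floordiv_iff_mul_le (by omega)).mp hk.le
  have hkhi : a < (k + 1) * chunk :=
    (PySem.Int.floordiv_lt_iff_lt_mul (by omega)).mp (by rw [← hk]; omega)
  have hku : k < (u : Int) := by
    rw [hk, PySem.Int.floordiv_lt_iff_lt_mul (by omega), mul_comm]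
    exact hau
  apply List.ext_getElem
  · simp [List.length_modify]
  · intro j hj hj'
    rw [List.length_modify, List.length_map, List.length_range] at hj
    simp only [List.getElem_modify, List.getElem_map, List.getElem_range]
    split_ifs with hjk
    · have hji : (j : Int) = k := by omega
      unfold pvSeg
      rw [hji]
      have h1 : min (k * chunk) a = k * chunk := by omega
      have h1' : min (k * chunk) (a + 1) = k * chunk := by omega
      have h2 : min ((k + 1) * chunk) a = a := by omega
      have h2' : min ((k + 1) * chunk) (a + 1) = a + 1 := by omega
      rw [h1, h1', h2, h2']
      exact (PySem.List.pyRange_one_succ_right hklo).symm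
    · unfold pvSeg
      rcases (by omega : (j : Int) < k ∨ k < (j : Int)) with h | h
      · have hhi : ((j : Int) + 1) * chunk ≤ k * chunk :=
          mul_le_mul_of_nonneg_right (by omega) (by omega)
        have hlo : (j : Int) * chunk < ((j : Int) + 1) * chunk := by nlinarith
        have e1 : min ((j : Int) * chunk) a = (j : Int) * chunk := by omega
        have e1' : min ((j : Int) * chunk) (a + 1) = (j : Int) * chunk := by omega
        have e2 : min (((j : Int) + 1) * chunk) a = ((j : Int) + 1) * chunk := by omega
        have e2' : min (((j : Int) + 1) * chunk) (a + 1) = ((j : Int) + 1) * chunk := by omega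
        rw [e1, e1', e2, e2']
      · have hlo : (k + 1) * chunk ≤ (j : Int) * chunk :=
          mul_le_mul_of_nonneg_right (by omega) (by omega)
        have hhi : (j : Int) * chunk ≤ ((j : Int) + 1) * chunk := by nlinarith
        rw [PySem.List.pyRange_one_eq_nil (by omega), PySem.List.pyRange_one_eq_nil (by omega)]

-- the distribution loop invariant, run from bound a to n
theorem pvBucket_inv (chunk n : Int) (u : Nat) (hc : 1 ≤ chunk) (hn : n ≤ chunk * u) :
    ∀ (k : Nat) (a : Int), 0 ≤ a → a + k = n →
      (PySem.List.pyRange a n 1).foldl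
          (fun out j => out.modify (PySem.Int.floordiv j chunk).toNat (fun b => b ++ [j]))
          ((List.range u).map (pvSeg chunk a)) =
        (List.range u).map (pvSeg chunk n) := by
  intro k
  induction k with
  | zero =>
      intro a ha hak
      have : a = n := by omega
      subst this
      rw [PySem.List.pyRange_one_eq_nil (by omega)]
      rfl
  | succ k ih =>
      intro a ha hak
      have hlt : a < n := by omega
      rw [PySem.List.pyRange_one_cons hlt, List.foldl_cons,
        pvBucket_step chunk u hc a ha (by omega)]
      exact ih (a + 1) (by omega) (by omega)

theorem split_eq (n units : Int) (_hu : units ≠ 0) :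
    split_ports_serial_py n units = split_ports_serial_py_alt n units := by
  unfold split_ports_serial_py split_ports_serial_py_alt
  simp only []
  set chunk := PySem.Int.floordiv (n + units - 1) units with hchunk
  rw [pvALoop_eq, List.nil_append, pvInit_replicate]
  by_cases hpos : units ≥ 1
  · -- units ≥ 1: buckets exist
    have hune : units.toNat ≠ 0 := by omega
    have hne : List.replicate units.toNat ([] : List Int) ≠ [] := by
      simpa using hune
    by_cases hcpos : 1 ≤ chunk
    · -- chunk ≥ 1: n ≥ 1 and the distribution runs
      rw [if_pos ⟨hne, by omega⟩]
      have hn1 : 1 ≤ n := by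
        have := hcpos
        rw [hchunk, PySem.Int.le_floordiv_iff_mul_le (by omega)] at this
        omega
      have hnle : n ≤ chunk * units.toNat := by
        have h1 : n + units - 1 < (chunk + 1) * units := by
          rw [← PySem.Int.floordiv_lt_iff_lt_mul (by omega : (0:Int) < units), ← hchunk]
          omega
        have hcast : ((units.toNat : Int)) = units := by omega
        rw [hcast]
        nlinarith
      have hinit : List.replicate units.toNat ([] : List Int) =
          (List.range units.toNat).map (pvSeg chunk 0) := by
        symm
        rw [List.eq_replicate_iff]
        constructor
        · simp
        · intro x hx
          rcases List.mem_map.mp hx with ⟨i, _, h⟩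
          rw [← h, pvSeg_start chunk hcpos]
      have hsegs : pvSegs n chunk units.toNat 0 =
          (List.range units.toNat).map (pvSeg chunk n) := by
        have h0 : min ((0 : Int) * chunk) n = 0 := by
          have : (0 : Int) * chunk = 0 := by ring
          omega
        have := pvSegs_eq_map n chunk hcpos units.toNat 0
        rw [Nat.cast_zero, h0] at this
        rw [this, List.range_eq_range']
      rw [hinit, hsegs,
        pvBucket_inv chunk n units.toNat hcpos hnle n.toNat 0 le_rfl (by omega)]
    · -- chunk ≤ 0: every segment of A is empty, B keeps the empty buckets
      rw [if_neg (by intro h; exact hcpos (by omega))]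
      exact pvSegs_nonpos n chunk (by omega) units.toNat 0
  · -- units < 0: zero buckets on both sides
    have h0 : units.toNat = 0 := by omega
    rw [h0]
    rw [if_neg (by intro h; exact h.1 rfl)]
    simp [pvSegs]

-- ===== VERDICT (by name: the statement is the Claim_ definition above) =====
theorem split_ports_serial_py_spec : Claim_equal_split_ports_serial_py := by
  intro n units _ hpre
  exact (split_eq n units hpre).symm ▸ rfl
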